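-- pv_equiv track=rewrite | github.com/wtthornton/TappsMCP | packages/docs-mcp/src/docs_mcp/extractors/docstring_parser.py | _extract_summary_and_description
-- ===== SOURCE A (Python) =====
-- def _extract_summary_and_description(
--     docstring: str,
--     section_start: int | None,
-- ) -> tuple[str, str]:
--     """Extract the summary (first non-empty line) and body description.
--
--     ``section_start`` is the character index where the first recognised
--     section begins.  Everything between the summary paragraph and that
--     index is considered the extended description.
--     """
--     text = docstring[:section_start] if section_start is not None else docstring
--     lines = text.split("\n")
--
--     summary = ""
--     body_lines: list[str] = []
--     found_summary = False
--     past_summary_gap = False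
--
--     for line in lines:
--         stripped = line.strip()
--         if not found_summary:
--             if stripped:
--                 summary = stripped
--                 found_summary = True
--             continue
--
--         if not past_summary_gap:
--             if not stripped:
--                 past_summary_gap = True
--             continue
--
--         body_lines.append(stripped)
--
--     # Remove trailing blank lines from description
--     while body_lines and not body_lines[-1]:
--         body_lines.pop()
--
--     description = "\n".join(body_lines)
--     return summary, description
-- ===== SOURCE B (Python) =====
-- def _extract_summary_and_description(docstring, section_start):
--     text = docstring[:section_start] if section_start is not None else docstring
--     lines = text.split("\n")
--     i = next((k for k, ln in enumerate(lines) if ln.strip()), None)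
--     if i is None:
--         return "", ""
--     summary = lines[i].strip()
--     rest = lines[i + 1:]
--     j = next((k for k, ln in enumerate(rest) if not ln.strip()), None)
--     if j is None:
--         return summary, ""
--     body = [ln.strip() for ln in rest[j + 1:]]
--     n = len(body)
--     while n and not body[n - 1]:
--         n -= 1
--     return summary, "\n".join(body[:n])
-- ===== Notes on version B (the rewrite author's own statement) =====
-- stated objective: simpler
-- what changed: Replaces the fused single-pass state machine (found_summary/past_summary_gap flags) with a find-boundaries-then-slice decomposition: locate the summary line index, locate the first blank line after it, then slice, strip and trim the body.
import Mathlib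
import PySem

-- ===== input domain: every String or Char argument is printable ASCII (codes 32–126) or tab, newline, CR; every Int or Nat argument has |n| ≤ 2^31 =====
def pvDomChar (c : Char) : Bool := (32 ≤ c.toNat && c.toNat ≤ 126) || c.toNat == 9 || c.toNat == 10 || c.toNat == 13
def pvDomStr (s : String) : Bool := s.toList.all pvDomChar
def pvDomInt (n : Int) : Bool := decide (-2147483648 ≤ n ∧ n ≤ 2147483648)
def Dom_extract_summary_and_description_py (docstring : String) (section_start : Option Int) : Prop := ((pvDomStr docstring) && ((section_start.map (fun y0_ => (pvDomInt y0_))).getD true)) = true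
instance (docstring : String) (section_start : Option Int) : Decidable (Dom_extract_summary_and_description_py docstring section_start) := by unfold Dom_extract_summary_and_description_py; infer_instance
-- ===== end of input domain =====

-- One honest line: B replaces A's fused flag-driven state machine with a
-- find-summary-index / find-gap-index / slice-and-trim decomposition (objective: simpler).

-- ===== PORT A =====
-- the for-loop with its four mutable state variables (summary, body_lines, found_summary, past_summary_gap)
def pvALoop : List String → String → List String → Bool → Bool → String × List String
  | [], summary, body, _, _ => (summary, body)
  | l :: ls, summary, body, found, past =>
    let stripped := PySem.Str.strip l
    if !found then
      if stripped != "" then pvALoop ls stripped body true past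
      else pvALoop ls summary body found past
    else if !past then
      if stripped == "" then pvALoop ls summary body found true
      else pvALoop ls summary body found past
    else pvALoop ls summary (body ++ [stripped]) found past

-- the "while body_lines and not body_lines[-1]: body_lines.pop()" loop
def pvAPop (bl : List String) : List String :=
  if bl ≠ [] ∧ bl.getLast? = some "" then pvAPop bl.dropLast else bl
termination_by bl.length
decreasing_by
  have : bl ≠ [] := by tauto
  simpa [List.length_dropLast] using Nat.sub_lt (List.length_pos_iff.mpr this) one_pos

def extract_summary_and_description_py (docstring : String) (section_start : Option Int) : String × String :=
  let text := match section_start with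
    | some n => PySem.Str.slice docstring none (some n)
    | none => docstring
  let lines := (PySem.Str.split? text "\n").getD []
  let r := pvALoop lines "" [] false false
  (r.1, PySem.Str.join "\n" (pvAPop r.2))

-- ===== PORT B =====
-- the "while n and not body[n-1]: n -= 1" countdown
def pvBTrimLen (body : List String) : Nat → Nat
  | 0 => 0
  | n + 1 => if body.getD n "" == "" then pvBTrimLen body n else n + 1

def extract_summary_and_description_py_alt (docstring : String) (section_start : Option Int) : String × String :=
  let text := match section_start with
    | some n => PySem.Str.slice docstring none (some n)
    | none => docstring
  let lines := (PySem.Str.split? text "\n").getD []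
  match lines.findIdx? (fun ln => PySem.Str.strip ln != "") with
  | none => ("", "")
  | some i =>
    let summary := PySem.Str.strip (lines.getD i "")
    let rest := lines.drop (i + 1)
    match rest.findIdx? (fun ln => PySem.Str.strip ln == "") with
    | none => (summary, "")
    | some j =>
      let body := (rest.drop (j + 1)).map PySem.Str.strip
      (summary, PySem.Str.join "\n" (body.take (pvBTrimLen body body.length)))

-- ===== PRECONDITION & SPEC =====
def Spec_extract_summary_and_description_py (docstring : String) (section_start : Option Int) (out : String × String) : Prop := out = extract_summary_and_description_py_alt docstring section_start
instance (docstring : String) (section_start : Option Int) (out : String × String) : Decidable (Spec_extract_summary_and_description_py docstring section_start out) := by unfold Spec_extract_summary_and_description_py; infer_instance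

-- ===== CLAIM (what is proved, stated in full; the proofs are below) =====
def Claim_equal_extract_summary_and_description_py : Prop := ∀ (docstring : String) (section_start : Option Int), Dom_extract_summary_and_description_py docstring section_start → Spec_extract_summary_and_description_py docstring section_start (extract_summary_and_description_py docstring section_start)

-- ===== LEMMAS AND PROOFS =====

-- phase 2: both flags set — every remaining line is stripped and appended
theorem pvALoop_past (ms : List String) : ∀ (s : String) (acc : List String),
    pvALoop ms s acc true true = (s, acc ++ ms.map PySem.Str.strip) := by
  induction ms with
  | nil => intro s acc; simp [pvALoop]
  | cons m ms ih => intro s acc; simp [pvALoop, ih]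

-- phase 1: summary found, looking for the gap
theorem pvALoop_found (ms : List String) : ∀ (s : String),
    pvALoop ms s [] true false =
      (s, match ms.findIdx? (fun ln => PySem.Str.strip ln == "") with
          | none => []
          | some j => (ms.drop (j + 1)).map PySem.Str.strip) := by
  induction ms with
  | nil => intro s; simp [pvALoop]
  | cons m ms ih =>
    intro s
    by_cases h : PySem.Str.strip m = ""
    · simp [pvALoop, h, pvALoop_past, List.findIdx?_cons]
    · simp [pvALoop, h, ih, List.findIdx?_cons]
      cases ms.findIdx? (fun ln => PySem.Str.strip ln == "") <;> simp

theorem pvBTrimLen_le (body : List String) (n : Nat) : pvBTrimLen body n ≤ n := by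
  induction n with
  | zero => simp [pvBTrimLen]
  | succ n ih => simp only [pvBTrimLen]; split <;> omega

theorem pvBTrimLen_congr (body body' : List String) (n : Nat)
    (h : ∀ k, k < n → body.getD k "" = body'.getD k "") :
    pvBTrimLen body n = pvBTrimLen body' n := by
  induction n with
  | zero => rfl
  | succ n ih =>
    simp only [pvBTrimLen, h n (Nat.lt_succ_self n)]
    split <;> [exact ih (fun k hk => h k (Nat.lt_succ_of_lt hk)); rfl]

-- the trailing-blank trims agree
theorem pvAPop_eq_take (bl : List String) :
    pvAPop bl = bl.take (pvBTrimLen bl bl.length) := by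
  induction bl using pvAPop.induct with
  | case1 bl h ih =>
    obtain ⟨hne, hlast⟩ := h
    obtain ⟨n, hn⟩ : ∃ n, bl.length = n + 1 :=
      ⟨bl.length - 1, by have := List.length_pos_iff.mpr hne; omega⟩
    have hget : bl.getD n "" = "" := by
      have := List.getLast?_eq_getElem? (l := bl)
      rw [hlast] at this
      simp [List.getD, hn] at this ⊢
      simpa [← this]
    rw [pvAPop, if_pos ⟨hne, hlast⟩, ih, hn]
    simp only [pvBTrimLen, hget, beq_self_eq_true, if_true]
    have hdl : bl.dropLast.length = n := by simp [hn]
    rw [hdl]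
    have hc : pvBTrimLen bl.dropLast n = pvBTrimLen bl n := by
      apply pvBTrimLen_congr
      intro k hk
      have hk' : k < bl.dropLast.length := by omega
      have hksome : bl[k]? = some (bl[k]'(by omega)) := List.getElem?_eq_getElem (by omega)
      simp [List.getD, List.getElem?_dropLast, hn, hk, hksome]
    rw [hc]
    have hle := pvBTrimLen_le bl n
    rw [List.dropLast_eq_take, hn]
    simp [List.take_take]
    omega
  | case2 bl h =>
    rw [pvAPop, if_neg h]
    rcases bl.eq_nil_or_concat with rfl | ⟨ys, y, rfl⟩
    · simp
    · have hy : ¬ (y = "") := by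
        intro hy; exact h ⟨by simp, by simp [hy]⟩
      have : pvBTrimLen (ys ++ [y]) (ys.length + 1) = ys.length + 1 := by
        simp only [pvBTrimLen]
        rw [if_neg (by simp [List.getD, hy])]
      simp [this]

-- the core equivalence on the split line list
theorem pv_core (lines : List String) :
    (let r := pvALoop lines "" [] false false
     (r.1, PySem.Str.join "\n" (pvAPop r.2))) =
    (match lines.findIdx? (fun ln => PySem.Str.strip ln != "") with
     | none => ("", "")
     | some i =>
       let summary := PySem.Str.strip (lines.getD i "")
       let rest := lines.drop (i + 1)
       match rest.findIdx? (fun ln => PySem.Str.strip ln == "") with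
       | none => (summary, "")
       | some j =>
         let body := (rest.drop (j + 1)).map PySem.Str.strip
         (summary, PySem.Str.join "\n" (body.take (pvBTrimLen body body.length)))) := by
  induction lines with
  | nil => simp [pvALoop, pvAPop, PySem.Str.join]
  | cons l ls ih =>
    by_cases h : PySem.Str.strip l = ""
    · have hA : pvALoop (l :: ls) "" [] false false = pvALoop ls "" [] false false := by
        simp [pvALoop, h]
      simp only [List.findIdx?_cons, show (PySem.Str.strip l != "") = false from by simp [h]]
      rw [hA]
      simp only at ih
      rw [ih]
      simp only [cond_false, if_neg (by simp : ¬ (false = true))]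
      cases hfi : ls.findIdx? (fun ln => PySem.Str.strip ln != "") with
      | none => simp
      | some i => simp [List.getD]
    · simp only [pvALoop, h, List.findIdx?_cons]
      have hb : (PySem.Str.strip l != "") = true := by simp [h]
      simp only [hb, cond_true, Bool.not_false, if_true]
      rw [pvALoop_found]
      simp only [List.getD, List.getElem?_cons_zero, List.drop_succ_cons, List.drop_zero,
        Option.getD_some]
      cases hfj : ls.findIdx? (fun ln => PySem.Str.strip ln == "") with
      | none => simp [pvAPop, PySem.Str.join]
      | some j => simp [pvAPop_eq_take]

-- ===== VERDICT (by name: the statement is the Claim_ definition above) =====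
theorem extract_summary_and_description_py_spec : Claim_equal_extract_summary_and_description_py := by
  intro docstring section_start _
  unfold Spec_extract_summary_and_description_py
  unfold extract_summary_and_description_py extract_summary_and_description_py_alt
  exact pv_core _
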